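-- pv_equiv track=rewrite | github.com/JustAFloatingHead/KuhanPiirran | Geometry.py | are_same_vertices
-- ===== SOURCE A (Python) =====
-- def are_same_vertices(vertice_list1,vertice_list2):
--     if len(vertice_list1) != len(vertice_list2):
--         return False
--     starting_index=0
--     size=len(vertice_list1)
--     for i in range(size):
--         if vertice_list1[i:size]==vertice_list2[0:size-i] and vertice_list1[0:i]==vertice_list2[size-i:size]:
--             return True
--
--     vertice_list2.reverse()
--     for i in range(size):
--         if vertice_list1[i:size]==vertice_list2[0:size-i] and vertice_list1[0:i]==vertice_list2[size-i:size]: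
--             return True
--     return False
-- ===== SOURCE B (Python) =====
-- def are_same_vertices(vertice_list1, vertice_list2):
--     # Canonical-form comparison: equal-length lists are cyclic rotations of each
--     # other iff their lexicographically least rotations coincide; check l2 and
--     # reversed l2 for the two orientations. (Does not mutate vertice_list2.)
--     if len(vertice_list1) != len(vertice_list2):
--         return False
--     if not vertice_list1:
--         return True
--     canon1 = _least_rotation(vertice_list1)
--     return (canon1 == _least_rotation(vertice_list2)
--             or canon1 == _least_rotation(vertice_list2[::-1]))
--
--
-- def _least_rotation(xs):
--     n = len(xs)
--     best = xs
--     for i in range(1, n):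
--         cand = xs[i:] + xs[:i]
--         if cand < best:
--             best = cand
--     return best
-- ===== Notes on version B (the rewrite author's own statement) =====
-- stated objective: alternative
-- what changed: Instead of A's shift search (for each of n shifts compare two slice pairs of l1 against l2, then reverse l2 in place and repeat), B canonicalizes: it computes the lexicographically least rotation of each list once and decides by two single equality tests, canon(l1)==canon(l2) or canon(l1)==canon(reversed l2); B does not mutate its argument.
-- intended difference: On two empty lists A returns False (both its loops run zero times and it falls through) although the lists are identical; B returns True, the intended value for equal vertex lists. — e.g. on are_same_vertices([], []): A returns false, B returns true
import Mathlib
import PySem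

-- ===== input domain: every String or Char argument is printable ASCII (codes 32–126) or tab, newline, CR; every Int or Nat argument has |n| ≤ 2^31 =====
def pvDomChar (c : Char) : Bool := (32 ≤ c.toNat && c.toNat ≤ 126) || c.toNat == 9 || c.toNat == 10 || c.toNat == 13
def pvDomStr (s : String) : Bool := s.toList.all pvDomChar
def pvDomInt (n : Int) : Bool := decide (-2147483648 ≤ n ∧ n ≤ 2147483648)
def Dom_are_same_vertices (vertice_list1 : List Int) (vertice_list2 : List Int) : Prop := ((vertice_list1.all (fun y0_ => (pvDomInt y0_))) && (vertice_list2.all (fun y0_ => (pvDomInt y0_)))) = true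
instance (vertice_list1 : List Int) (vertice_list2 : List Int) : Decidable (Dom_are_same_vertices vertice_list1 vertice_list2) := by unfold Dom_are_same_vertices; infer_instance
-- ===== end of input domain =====

-- B replaces A's per-shift two-slice rotation search (with an in-place reverse of
-- vertice_list2 and a second identical loop) by canonicalization: compare the
-- lexicographically least rotations of l1, l2 and reversed l2; equivalence is about
-- the RETURN value only (A reverses vertice_list2 in place; B does not mutate).


-- ===== PORT A =====
def are_same_vertices (vertice_list1 : List Int) (vertice_list2 : List Int) : Bool :=
  if vertice_list1.length ≠ vertice_list2.length then false
  else
    let size := vertice_list1.length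
    -- for i in range(size): if l1[i:size]==l2[0:size-i] and l1[0:i]==l2[size-i:size]: return True
    if (List.range size).any (fun i =>
        PySem.List.slice vertice_list1 (some (i : Int)) (some (size : Int)) ==
          PySem.List.slice vertice_list2 (some 0) (some ((size : Int) - (i : Int))) &&
        PySem.List.slice vertice_list1 (some 0) (some (i : Int)) ==
          PySem.List.slice vertice_list2 (some ((size : Int) - (i : Int))) (some (size : Int)))
    then true
    else
      -- vertice_list2.reverse()
      let l2r := vertice_list2.reverse
      if (List.range size).any (fun i =>
          PySem.List.slice vertice_list1 (some (i : Int)) (some (size : Int)) ==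
            PySem.List.slice l2r (some 0) (some ((size : Int) - (i : Int))) &&
          PySem.List.slice vertice_list1 (some 0) (some (i : Int)) ==
            PySem.List.slice l2r (some ((size : Int) - (i : Int))) (some (size : Int)))
      then true
      else false

-- ===== PORT B =====
-- Python's `<` on lists of ints: lexicographic, exact transliteration.
def pyLexLt : List Int → List Int → Bool
  | [], [] => false
  | [], _ :: _ => true
  | _ :: _, [] => false
  | a :: as, b :: bs => a < b || (a == b && pyLexLt as bs)

-- _least_rotation(xs): best = xs; for i in range(1, n): cand = xs[i:]+xs[:i]; if cand < best: best = cand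
def leastRotation (xs : List Int) : List Int :=
  (List.range' 1 (xs.length - 1)).foldl (fun best (i : Nat) =>
    let cand := PySem.List.slice xs (some (i : Int)) none ++ PySem.List.slice xs none (some (i : Int))
    if pyLexLt cand best then cand else best) xs

def are_same_vertices_alt (vertice_list1 : List Int) (vertice_list2 : List Int) : Bool :=
  if vertice_list1.length ≠ vertice_list2.length then false
  else if vertice_list1 = [] then true
  else
    let canon1 := leastRotation vertice_list1
    (canon1 == leastRotation vertice_list2) ||
      (canon1 == leastRotation vertice_list2.reverse)   -- l2[::-1]; exact by PySem.List.slice?_none_none_neg_one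

-- ===== PRECONDITION & SPEC =====
-- On two empty lists A returns False (both its loops run zero times and it falls
-- through) although the lists are identical; B returns True, the intended value.
def D_are_same_vertices (vertice_list1 : List Int) (vertice_list2 : List Int) : Prop :=
  vertice_list1 = [] ∧ vertice_list2 = []
instance (vertice_list1 : List Int) (vertice_list2 : List Int) : Decidable (D_are_same_vertices vertice_list1 vertice_list2) := by unfold D_are_same_vertices; infer_instance

def Spec_are_same_vertices (vertice_list1 : List Int) (vertice_list2 : List Int) (out : Bool) : Prop := ¬ D_are_same_vertices vertice_list1 vertice_list2 → out = are_same_vertices_alt vertice_list1 vertice_list2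
instance (vertice_list1 : List Int) (vertice_list2 : List Int) (out : Bool) : Decidable (Spec_are_same_vertices vertice_list1 vertice_list2 out) := by unfold Spec_are_same_vertices; infer_instance

def pvDiffWitness_are_same_vertices : List Int × List Int := ([], [])
def pvDiffWitnessOut_are_same_vertices : Bool × Bool := (false, true)

-- ===== CLAIM (what is proved, stated in full; the proofs are below) =====
def Claim_unchanged_are_same_vertices : Prop := ∀ (vertice_list1 : List Int) (vertice_list2 : List Int), Dom_are_same_vertices vertice_list1 vertice_list2 → Spec_are_same_vertices vertice_list1 vertice_list2 (are_same_vertices vertice_list1 vertice_list2)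
def Claim_changed_are_same_vertices : Prop := Dom_are_same_vertices (pvDiffWitness_are_same_vertices.1) (pvDiffWitness_are_same_vertices.2) ∧ D_are_same_vertices (pvDiffWitness_are_same_vertices.1) (pvDiffWitness_are_same_vertices.2) ∧ are_same_vertices (pvDiffWitness_are_same_vertices.1) (pvDiffWitness_are_same_vertices.2) = pvDiffWitnessOut_are_same_vertices.1 ∧ are_same_vertices_alt (pvDiffWitness_are_same_vertices.1) (pvDiffWitness_are_same_vertices.2) = pvDiffWitnessOut_are_same_vertices.2 ∧ pvDiffWitnessOut_are_same_vertices.1 ≠ pvDiffWitnessOut_are_same_vertices.2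
def Claim_exact_are_same_vertices : Prop := ∀ (vertice_list1 : List Int) (vertice_list2 : List Int), Dom_are_same_vertices vertice_list1 vertice_list2 → D_are_same_vertices vertice_list1 vertice_list2 → are_same_vertices vertice_list1 vertice_list2 ≠ are_same_vertices_alt vertice_list1 vertice_list2

-- ===== LEMMAS AND PROOFS =====

theorem pyLexLt_irrefl (a : List Int) : pyLexLt a a = false := by
  induction a with
  | nil => rfl
  | cons x xs ih => simp [pyLexLt, ih]

theorem pyLexLt_antisymm : ∀ (a b : List Int), pyLexLt a b = false → pyLexLt b a = false → a = b := by
  intro a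
  induction a with
  | nil => intro b; cases b <;> simp [pyLexLt]
  | cons x xs ih =>
    intro b
    cases b with
    | nil => simp [pyLexLt]
    | cons y ys =>
      simp only [pyLexLt, Bool.or_eq_false_iff, Bool.and_eq_false_iff, decide_eq_false_iff_not,
        beq_eq_false_iff_ne, ne_eq, List.cons.injEq]
      rintro ⟨h1, h2⟩ ⟨h3, h4⟩
      have hxy : x = y := by omega
      subst hxy
      rcases h2 with h | h
      · exact absurd rfl h
      · rcases h4 with h' | h'
        · exact absurd rfl h'
        · exact ⟨rfl, ih ys h h'⟩

theorem pyLexLt_trans : ∀ (a b c : List Int), pyLexLt a b = true → pyLexLt b c = true → pyLexLt a c = true := by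
  intro a
  induction a with
  | nil =>
    intro b c hab hbc
    cases b with
    | nil => exact absurd hab (by simp [pyLexLt])
    | cons y ys => cases c with
      | nil => exact absurd hbc (by simp [pyLexLt])
      | cons z zs => simp [pyLexLt]
  | cons x xs ih =>
    intro b c hab hbc
    cases b with
    | nil => exact absurd hab (by simp [pyLexLt])
    | cons y ys =>
      cases c with
      | nil => exact absurd hbc (by simp [pyLexLt])
      | cons z zs =>
        simp only [pyLexLt, Bool.or_eq_true, Bool.and_eq_true, decide_eq_true_eq, beq_iff_eq] at *
        rcases hab with h | ⟨he, h⟩ <;> rcases hbc with h' | ⟨he', h'⟩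
        · left; omega
        · left; omega
        · left; omega
        · right; exact ⟨he.trans he', ih ys zs h h'⟩

-- the fold that keeps the pyLexLt-least candidate
def minFold (b : List Int) (cs : List (List Int)) : List Int :=
  cs.foldl (fun best c => if pyLexLt c best then c else best) b

theorem minFold_mem : ∀ (cs : List (List Int)) (b : List Int), minFold b cs ∈ b :: cs := by
  intro cs
  induction cs with
  | nil => intro b; simp [minFold]
  | cons c rest ih =>
    intro b
    have hstep : minFold b (c :: rest) = minFold (if pyLexLt c b then c else b) rest := by
      simp [minFold]
    rw [hstep]
    by_cases h : pyLexLt c b = true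
    · rw [if_pos h]
      have := ih c
      simp only [List.mem_cons] at this ⊢
      tauto
    · rw [if_neg h]
      have := ih b
      simp only [List.mem_cons] at this ⊢
      tauto

theorem minFold_le : ∀ (cs : List (List Int)) (b : List Int) (y : List Int), y ∈ b :: cs → pyLexLt y (minFold b cs) = false := by
  intro cs
  induction cs with
  | nil =>
    intro b y hy
    simp at hy
    subst hy
    simpa [minFold] using pyLexLt_irrefl y
  | cons c rest ih =>
    intro b y hy
    have hstep : minFold b (c :: rest) = minFold (if pyLexLt c b then c else b) rest := by
      simp [minFold]
    rw [hstep]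
    simp only [List.mem_cons] at hy
    by_cases h : pyLexLt c b = true
    · rw [if_pos h] at *
      have hc : pyLexLt c (minFold c rest) = false := ih c c (by simp)
      rcases hy with rfl | rfl | hmem
      · -- y = b, the discarded start: transitivity through c
        by_contra hby
        simp only [Bool.not_eq_false] at hby
        have := pyLexLt_trans c y (minFold c rest) h hby
        rw [this] at hc
        exact Bool.true_eq_false ▸ hc.symm ▸ rfl
      · exact hc
      · exact ih c y (by simp [hmem])
    · rw [if_neg h] at *
      simp only [Bool.not_eq_true] at h
      have hb : pyLexLt b (minFold b rest) = false := ih b b (by simp)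
      rcases hy with rfl | rfl | hmem
      · exact hb
      · -- y = c, the discarded candidate: pyLexLt c b = false
        by_contra hcy
        simp only [Bool.not_eq_false] at hcy
        cases hbc : pyLexLt b y with
        | false =>
          have hby : b = y := pyLexLt_antisymm b y hbc h
          rw [← hby] at hcy
          rw [hcy] at hb
          cases hb
        | true =>
          have := pyLexLt_trans b y (minFold b rest) hbc hcy
          rw [this] at hb
          cases hb
      · exact ih b y (by simp [hmem])

-- the list of all rotations of xs
def rotList (xs : List Int) : List (List Int) := (List.range xs.length).map (xs.rotate ·)

theorem mem_rotList (xs y : List Int) : y ∈ rotList xs ↔ ∃ i, i < xs.length ∧ y = xs.rotate i := by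
  simp only [rotList, List.mem_map, List.mem_range]
  constructor
  · rintro ⟨i, hi, rfl⟩; exact ⟨i, hi, rfl⟩
  · rintro ⟨i, hi, rfl⟩; exact ⟨i, hi, rfl⟩

-- leastRotation xs is minFold over the rotations (nonempty xs)
theorem leastRotation_eq_minFold (xs : List Int) (hne : xs ≠ []) :
    leastRotation xs = minFold xs ((List.range' 1 (xs.length - 1)).map (xs.rotate ·)) := by
  unfold leastRotation minFold
  rw [List.foldl_map]
  apply PySem.List.foldl_congr_mem
  intro best i hi
  have hmem := (List.mem_range'_1).mp hi
  have hlen : 0 < xs.length := List.length_pos_iff.mpr hne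
  have hilt : i ≤ xs.length := by omega
  have hslice : PySem.List.slice xs (some (i : Int)) none ++ PySem.List.slice xs none (some (i : Int)) = xs.rotate i := by
    rw [PySem.List.slice_from_natCast, PySem.List.slice_to_natCast,
      List.rotate_eq_drop_append_take hilt]
  simp only [hslice]

theorem rotList_cons (xs : List Int) (hne : xs ≠ []) :
    rotList xs = xs :: (List.range' 1 (xs.length - 1)).map (xs.rotate ·) := by
  have hlen : 0 < xs.length := List.length_pos_iff.mpr hne
  obtain ⟨m, hm⟩ : ∃ m, xs.length = m + 1 := ⟨xs.length - 1, by omega⟩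
  unfold rotList
  rw [hm, List.range_eq_range', List.range'_succ, List.map_cons, List.rotate_zero]
  simp

-- leastRotation xs is a rotation of xs and pyLexLt-minimal among rotations
theorem leastRotation_mem (xs : List Int) (hne : xs ≠ []) : leastRotation xs ∈ rotList xs := by
  rw [leastRotation_eq_minFold xs hne, rotList_cons xs hne]
  exact minFold_mem _ _

theorem leastRotation_le (xs y : List Int) (hne : xs ≠ []) (hy : y ∈ rotList xs) :
    pyLexLt y (leastRotation xs) = false := by
  rw [leastRotation_eq_minFold xs hne]
  rw [rotList_cons xs hne] at hy
  exact minFold_le _ _ _ hy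

-- a rotation of a rotation is a rotation: transfer membership between rotation lists
theorem rotate_transfer (x y : List Int) (i : Nat) (hi : i < x.length) (hxy : y = x.rotate i) :
    ∀ z, z ∈ rotList x → z ∈ rotList y := by
  intro z hz
  have hn : 0 < x.length := by omega
  have hylen : y.length = x.length := by rw [hxy]; simp
  obtain ⟨j, hj, rfl⟩ := (mem_rotList x z).mp hz
  refine (mem_rotList y _).mpr ⟨(x.length - i + j) % x.length, by rw [hylen]; exact Nat.mod_lt _ hn, ?_⟩
  have h1 : y.rotate ((x.length - i + j) % x.length) = y.rotate (x.length - i + j) := by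
    rw [show (x.length - i + j) % x.length = (x.length - i + j) % y.length from by rw [hylen]]
    exact List.rotate_mod y _
  rw [h1, hxy, List.rotate_rotate]
  have h2 : i + (x.length - i + j) = x.length + j := by omega
  rw [h2, ← List.rotate_rotate, List.rotate_length]

theorem rot_iff_leastRotation_eq (x y : List Int) (hne : x ≠ []) (hlen : x.length = y.length) :
    (∃ i, i < x.length ∧ y = x.rotate i) ↔ leastRotation x = leastRotation y := by
  have hyne : y ≠ [] := by
    intro h
    rw [h] at hlen
    simp at hlen
    exact hne hlen
  have hn : 0 < x.length := List.length_pos_iff.mpr hne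
  constructor
  · rintro ⟨i, hi, hxy⟩
    have hx2y := rotate_transfer x y i hi hxy
    have hy2x : ∀ z, z ∈ rotList y → z ∈ rotList x := by
      have hxrot : x = y.rotate ((x.length - i) % x.length) := by
        have e1 : y.rotate ((x.length - i) % x.length) = y.rotate (x.length - i) := by
          rw [show (x.length - i) % x.length = (x.length - i) % y.length from by rw [hlen]]
          exact List.rotate_mod y _
        rw [e1, hxy, List.rotate_rotate, show i + (x.length - i) = x.length from by omega,
          List.rotate_length]
      exact rotate_transfer y x ((x.length - i) % x.length)
        (by rw [← hlen]; exact Nat.mod_lt _ hn) hxrot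
    have h1 : pyLexLt (leastRotation x) (leastRotation y) = false :=
      leastRotation_le y _ hyne (hx2y _ (leastRotation_mem x hne))
    have h2 : pyLexLt (leastRotation y) (leastRotation x) = false :=
      leastRotation_le x _ hne (hy2x _ (leastRotation_mem y hyne))
    exact pyLexLt_antisymm _ _ h1 h2
  · intro hcanon
    obtain ⟨i, hi, hix⟩ := (mem_rotList x _).mp (leastRotation_mem x hne)
    obtain ⟨j, hj, hjy⟩ := (mem_rotList y _).mp (leastRotation_mem y hyne)
    have heq : x.rotate i = y.rotate j := by rw [← hix, ← hjy, hcanon]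
    refine ⟨(i + (y.length - j)) % x.length, Nat.mod_lt _ hn, ?_⟩
    rw [List.rotate_mod]
    calc y = (y.rotate j).rotate (y.length - j) := by
            rw [List.rotate_rotate]
            have : j + (y.length - j) = y.length := by omega
            rw [this, List.rotate_length]
      _ = (x.rotate i).rotate (y.length - j) := by rw [heq]
      _ = x.rotate (i + (y.length - j)) := List.rotate_rotate x _ _

-- A's per-shift condition at i (< n = common length) says exactly "l2 = l1.rotate i".
theorem condA_iff (l1 l2 : List Int) (h : l1.length = l2.length) (i : Nat) (hi : i < l1.length) :
    ((PySem.List.slice l1 (some (i : Int)) (some (l1.length : Int)) ==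
        PySem.List.slice l2 (some 0) (some ((l1.length : Int) - (i : Int))) &&
      PySem.List.slice l1 (some 0) (some (i : Int)) ==
        PySem.List.slice l2 (some ((l1.length : Int) - (i : Int))) (some (l1.length : Int))) = true)
      ↔ l2 = l1.rotate i := by
  have hsub : (l1.length : Int) - (i : Int) = ((l1.length - i : Nat) : Int) := by omega
  rw [hsub]
  simp only [PySem.List.slice_zero_start, PySem.List.slice_natCast, PySem.List.slice_to_natCast,
    Bool.and_eq_true, beq_iff_eq]
  rw [List.rotate_eq_drop_append_take (by omega)]
  have h1 : (l1.drop i).take (l1.length - i) = l1.drop i := by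
    apply List.take_of_length_le; simp
  have h2 : (l2.drop (l1.length - i)).take (l1.length - (l1.length - i)) = l2.drop (l1.length - i) := by
    apply List.take_of_length_le; simp; omega
  rw [h1, h2]
  constructor
  · rintro ⟨e1, e2⟩
    calc l2 = l2.take (l1.length - i) ++ l2.drop (l1.length - i) := (List.take_append_drop _ _).symm
    _ = l1.drop i ++ l1.take i := by rw [← e1, ← e2]
  · intro e
    have hlen : (l1.drop i).length = l1.length - i := by simp
    constructor
    · rw [e, ← hlen, List.take_left]
    · rw [e, ← hlen, List.drop_left]

-- A's loop over a target list m succeeds iff m is a rotation of l1, iff the canonical forms agree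
theorem loopA_iff_canon (l1 m : List Int) (hne : l1 ≠ []) (hm : l1.length = m.length) :
    ((List.range l1.length).any (fun i =>
        PySem.List.slice l1 (some (i : Int)) (some (l1.length : Int)) ==
          PySem.List.slice m (some 0) (some ((l1.length : Int) - (i : Int))) &&
        PySem.List.slice l1 (some 0) (some (i : Int)) ==
          PySem.List.slice m (some ((l1.length : Int) - (i : Int))) (some (l1.length : Int)))) =
      (leastRotation l1 == leastRotation m) := by
  rw [Bool.eq_iff_iff]
  simp only [List.any_eq_true, List.mem_range, beq_iff_eq]
  rw [← rot_iff_leastRotation_eq l1 m hne hm]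
  constructor
  · rintro ⟨i, hi, hc⟩; exact ⟨i, hi, (condA_iff l1 m hm i hi).mp hc⟩
  · rintro ⟨i, hi, hc⟩; exact ⟨i, hi, (condA_iff l1 m hm i hi).mpr hc⟩

-- ===== VERDICT (by name: the statements are the Claim_ definitions above) =====
theorem are_same_vertices_spec : Claim_unchanged_are_same_vertices := by
  intro l1 l2 _ hD
  unfold are_same_vertices are_same_vertices_alt
  by_cases hlen : l1.length = l2.length
  · simp only [hlen, ne_eq, not_true_eq_false, if_false]
    by_cases hne : l1 = []
    · exfalso
      apply hD
      have : l2 = [] := by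
        rw [hne] at hlen; exact List.length_eq_zero_iff.mp hlen.symm
      exact ⟨hne, this⟩
    · simp only [hne, if_false]
      rw [← hlen]
      have c1 := loopA_iff_canon l1 l2 hne hlen
      have c2 := loopA_iff_canon l1 l2.reverse hne (by simpa using hlen)
      rw [c1, c2]
      cases h1 : (leastRotation l1 == leastRotation l2) <;>
        cases h2 : (leastRotation l1 == leastRotation l2.reverse) <;> simp
  · simp [hlen]

theorem are_same_vertices_changed : Claim_changed_are_same_vertices := by
  unfold Claim_changed_are_same_vertices; decide

theorem are_same_vertices_tight : Claim_exact_are_same_vertices := by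
  intro l1 l2 _ hD
  obtain ⟨h1, h2⟩ := hD
  subst h1; subst h2
  decide
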